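-- pv_equiv track=rewrite | github.com/K1521/geometricalgebra1 | old/blademulexplained2.py | blademul
-- ===== SOURCE A (Python) =====
-- def blademul(b1,b2):
--     bas1acc=b1
--     i=1
--     while True:
--         shifted=bas1acc>>i
--         if shifted==0:
--             break
--         bas1acc^=shifted
--         i<<=1
--     return (bas1acc&b2).bit_count()&1
-- ===== SOURCE B (Python) =====
-- def blademul(b1, b2):
--     # direct inversion count: sum popcount((b1 >> k) & b2) over all shifts k,
--     # i.e. count pairs (i in b1, j in b2) with i >= j; return its parity
--     total = 0
--     a = b1
--     while a:
--         total += (a & b2).bit_count()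
--         a >>= 1
--     return total & 1
-- ===== Notes on version B (the rewrite author's own statement) =====
-- stated objective: simpler
-- what changed: Replaces the parallel-prefix XOR trick (doubling-shift loop that smears bit parities, then one masked popcount) by the canonical direct inversion count: shift b1 down one bit at a time, summing popcount((b1>>k) & b2), and return the parity of the total.
-- outside the precondition, e.g. on blademul(-1, -1): A returns 0, B does not finish within the time limit
import Mathlib
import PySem

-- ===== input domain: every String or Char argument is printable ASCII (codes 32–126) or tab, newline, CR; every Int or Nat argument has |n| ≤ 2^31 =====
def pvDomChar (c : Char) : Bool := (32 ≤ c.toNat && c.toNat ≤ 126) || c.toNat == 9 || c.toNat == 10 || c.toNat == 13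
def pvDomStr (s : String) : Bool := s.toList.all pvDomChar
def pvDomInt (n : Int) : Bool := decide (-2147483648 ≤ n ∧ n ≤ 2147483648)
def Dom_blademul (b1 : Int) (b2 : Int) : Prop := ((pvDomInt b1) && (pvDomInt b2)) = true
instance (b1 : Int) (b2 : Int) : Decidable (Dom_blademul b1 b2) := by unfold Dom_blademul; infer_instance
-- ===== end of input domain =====

-- B replaces A's parallel-prefix-XOR trick by the direct inversion-count loop (same values; return-value equivalence).

-- ===== PORT A =====
-- the while-True loop; fuel only makes it total (it breaks within b1.natAbs+1 rounds when b1 ≥ 0)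
def blademulLoop : Nat → Int → Nat → Int
  | 0, acc, _ => acc
  | fuel+1, acc, i =>
    if acc >>> i = 0 then acc
    else blademulLoop fuel (PySem.Int.bxor acc (acc >>> i)) (i <<< 1)

def blademul (b1 : Int) (b2 : Int) : Int :=
  PySem.Int.band ((PySem.Int.bitCount (PySem.Int.band (blademulLoop (b1.natAbs + 1) b1 1) b2) : Nat) : Int) 1

-- ===== PORT B =====
-- the 'while a:' loop of Source B; fuel only makes it total (b1.natAbs+1 rounds suffice for b1 ≥ 0)
def blademulAltLoop : Nat → Int → Nat → Int → Nat
  | 0, _, total, _ => total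
  | fuel+1, a, total, b2 =>
    if a = 0 then total
    else blademulAltLoop fuel (a >>> (1 : Nat)) (total + PySem.Int.bitCount (PySem.Int.band a b2)) b2

def blademul_alt (b1 : Int) (b2 : Int) : Int :=
  PySem.Int.band ((blademulAltLoop (b1.natAbs + 1) b1 0 b2 : Nat) : Int) 1

-- ===== PRECONDITION & SPEC =====
-- Pre_ excludes b1 < 0 (not a blade bitmask): there A's doubling loop happens to terminate on the
-- two's-complement sign bits and returns an accidental parity, while B's natural counting loop
-- ('while a: ... a >>= 1') never terminates, so B cannot return a value to match.
def Pre_blademul (b1 : Int) (_b2 : Int) : Prop := 0 ≤ b1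
instance (b1 : Int) (b2 : Int) : Decidable (Pre_blademul b1 b2) := by unfold Pre_blademul; infer_instance
def pvWitness_blademul : Int × Int := (5, 3)

def Spec_blademul (b1 : Int) (b2 : Int) (out : Int) : Prop := out = blademul_alt b1 b2
instance (b1 : Int) (b2 : Int) (out : Int) : Decidable (Spec_blademul b1 b2 out) := by unfold Spec_blademul; infer_instance

-- ===== CLAIM (what is proved, stated in full; the proofs are below) =====
def Claim_equal_blademul : Prop := ∀ (b1 : Int) (b2 : Int), Dom_blademul b1 b2 → Pre_blademul b1 b2 → Spec_blademul b1 b2 (blademul b1 b2)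

-- ===== LEMMAS AND PROOFS =====

-- Nat model of A's loop
def loopN : Nat → Nat → Nat → Nat
  | 0, acc, _ => acc
  | fuel+1, acc, i =>
    if acc >>> i = 0 then acc
    else loopN fuel (acc ^^^ (acc >>> i)) (i <<< 1)

-- prefix XOR of all right-shifts of n (the value A's loop converges to)
def g (n : Nat) : Nat :=
  if _hn : n = 0 then 0 else n ^^^ g (n / 2)
decreasing_by omega

-- XOR of the first K right-shifts of n
def f : Nat → Nat → Nat
  | 0, _ => 0
  | K+1, n => n ^^^ f K (n / 2)

-- the total accumulated by B's loop
def T (b2 : Int) (n : Nat) : Nat :=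
  if _hn : n = 0 then 0 else PySem.Int.bitCount (PySem.Int.band (n : Int) b2) + T b2 (n / 2)
decreasing_by omega

theorem g_zero : g 0 = 0 := by rw [g]; rfl

theorem g_pos (n : Nat) (h : n ≠ 0) : g n = n ^^^ g (n / 2) := by rw [g]; simp [h]

theorem T_zero (b2 : Int) : T b2 0 = 0 := by rw [T]; rfl

theorem T_pos (b2 : Int) (n : Nat) (h : n ≠ 0) :
    T b2 n = PySem.Int.bitCount (PySem.Int.band (n : Int) b2) + T b2 (n / 2) := by
  rw [T]; simp [h]

theorem srz (n i : Nat) : n >>> i = 0 ↔ n < 2 ^ i := by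
  simp [Nat.shiftRight_eq_div_pow, Nat.div_eq_zero_iff]

theorem and_mod_two (a b : Nat) : (a &&& b) % 2 = a % 2 * (b % 2) := by
  have h : (a &&& b).testBit 0 = (a.testBit 0 && b.testBit 0) := by
    simp
  simp only [Nat.testBit_zero] at h
  rcases Nat.mod_two_eq_zero_or_one a with h1|h1 <;>
    rcases Nat.mod_two_eq_zero_or_one b with h2|h2 <;>
    rcases Nat.mod_two_eq_zero_or_one (a &&& b) with h3|h3 <;>
    simp [h1, h2, h3] at h ⊢

-- x minus a submask of x is x XOR that submask
theorem sub_and_eq_xor_and (x m : Nat) : x - (x &&& m) = x ^^^ (x &&& m) := by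
  induction x using Nat.strong_induction_on generalizing m with
  | _ x ih =>
    rcases Nat.eq_zero_or_pos x with h0 | h0
    · simp [h0]
    · have hd : (x &&& m) / 2 = x / 2 &&& m / 2 := Nat.and_div_two
      have hm : (x &&& m) % 2 = x % 2 * (m % 2) := and_mod_two x m
      have hxd : (x ^^^ (x &&& m)) / 2 = x / 2 ^^^ ((x &&& m) / 2) := Nat.xor_div_two
      rw [hd] at hxd
      have hxm : (x ^^^ (x &&& m)) % 2 = (x + (x &&& m)) % 2 := Nat.xor_mod_two_eq
      have hih : x / 2 - (x / 2 &&& m / 2) = x / 2 ^^^ (x / 2 &&& m / 2) :=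
        ih (x / 2) (by omega) (m / 2)
      have hsle : (x &&& m) % 2 ≤ x % 2 := by
        rcases Nat.mod_two_eq_zero_or_one m with h2|h2 <;> rw [hm, h2] <;> omega
      have hle : x &&& m ≤ x := Nat.and_le_left
      have hle2 : x / 2 &&& m / 2 ≤ x / 2 := Nat.and_le_left
      omega

theorem bc_xor (u v : Nat) :
    PySem.Int.bitCount ((u ^^^ v : Nat) : Int) % 2
      = (PySem.Int.bitCount (u : Int) + PySem.Int.bitCount (v : Int)) % 2 := by
  induction u using Nat.strong_induction_on generalizing v with
  | _ u ih =>
    rcases Nat.eq_zero_or_pos u with h0 | h0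
    · simp [h0]
    · rcases Nat.eq_zero_or_pos v with hv0 | hv0
      · simp [hv0]
      · have hu := PySem.Int.bitCount_natCast (m := u) h0
        have hv := PySem.Int.bitCount_natCast (m := v) hv0
        have hxd : (u ^^^ v) / 2 = u / 2 ^^^ v / 2 := Nat.xor_div_two
        have hxm : (u ^^^ v) % 2 = (u + v) % 2 := Nat.xor_mod_two_eq
        have hih := ih (u / 2) (by omega) (v / 2)
        rcases Nat.eq_zero_or_pos (u ^^^ v) with hw0 | hw0
        · have huv : u = v := by
            have := Nat.xor_eq_zero_iff.mp hw0
            exact this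
          rw [hw0, huv]
          simp; omega
        · have hw := PySem.Int.bitCount_natCast (m := u ^^^ v) hw0
          rw [hw, hu, hv, hxd] at *
          omega

-- band with a nonneg left argument, negative right argument
theorem band_natCast_neg (z : Nat) (b2 : Int) (hb2 : b2 < 0) :
    PySem.Int.band (z : Int) b2 = ((z ^^^ (z &&& (-b2 - 1).toNat) : Nat) : Int) := by
  have h1 : (0 : Int) ≤ (z : Int) := Int.natCast_nonneg z
  have h2 : ¬ (0 : Int) ≤ b2 := by omega
  simp only [PySem.Int.band, if_pos h1, if_neg h2, Int.toNat_natCast]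
  rw [← sub_and_eq_xor_and]

-- parity of a masked popcount is additive across XOR, for any mask b2
theorem band_parity (x y : Nat) (b2 : Int) :
    PySem.Int.bitCount (PySem.Int.band ((x ^^^ y : Nat) : Int) b2) % 2
      = (PySem.Int.bitCount (PySem.Int.band (x : Int) b2)
         + PySem.Int.bitCount (PySem.Int.band (y : Int) b2)) % 2 := by
  by_cases hb2 : 0 ≤ b2
  · rw [PySem.Int.band_of_nonneg (Int.natCast_nonneg _) hb2,
        PySem.Int.band_of_nonneg (Int.natCast_nonneg _) hb2,
        PySem.Int.band_of_nonneg (Int.natCast_nonneg _) hb2]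
    simp only [Int.toNat_natCast]
    rw [Nat.and_xor_distrib_right]
    exact bc_xor _ _
  · have hb2' : b2 < 0 := by omega
    rw [band_natCast_neg _ _ hb2', band_natCast_neg _ _ hb2', band_natCast_neg _ _ hb2']
    rw [Nat.and_xor_distrib_right]
    have hre : (x ^^^ y) ^^^ ((x &&& (-b2 - 1).toNat) ^^^ (y &&& (-b2 - 1).toNat))
        = (x ^^^ (x &&& (-b2 - 1).toNat)) ^^^ (y ^^^ (y &&& (-b2 - 1).toNat)) := by
      simp [Nat.xor_assoc, Nat.xor_comm, Nat.xor_left_comm]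
    rw [hre]
    exact bc_xor _ _

-- A's final masked popcount of g n has the same parity as B's total T b2 n
theorem g_parity (b2 : Int) (n : Nat) :
    PySem.Int.bitCount (PySem.Int.band ((g n : Nat) : Int) b2) % 2 = T b2 n % 2 := by
  induction n using Nat.strong_induction_on with
  | _ n ih =>
    rcases Nat.eq_zero_or_pos n with h0 | h0
    · subst h0
      rw [g_zero, T_zero]
      rw [PySem.Int.band_comm]
      simp
    · rw [g_pos n (by omega), T_pos b2 n (by omega)]
      have h1 := band_parity n (g (n / 2)) b2
      have h2 := ih (n / 2) (by omega)
      omega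

theorem f_zero (K : Nat) : f K 0 = 0 := by
  induction K with
  | zero => rfl
  | succ K ih => simp [f, ih]

theorem f_lt (K n p : Nat) (h : n < 2 ^ p) : f K n < 2 ^ p := by
  induction K generalizing n with
  | zero => simp only [f]; positivity
  | succ K ih =>
    have h2 : n / 2 < 2 ^ p := by omega
    exact Nat.xor_lt_two_pow h (ih _ h2)

theorem f_eq_g (K n : Nat) (h : n < 2 ^ K) : f K n = g n := by
  induction K generalizing n with
  | zero => interval_cases n; simp [f, g_zero]
  | succ K ih =>
    rcases Nat.eq_zero_or_pos n with h0 | h0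
    · simp [h0, f, f_zero, g_zero]
    · have hp : 2 ^ (K + 1) = 2 * 2 ^ K := by ring
      have h2 : n / 2 < 2 ^ K := by omega
      rw [f, ih _ h2, ← g_pos n (by omega)]

theorem f_shift_one (K n : Nat) : f K (n / 2) = f K n / 2 := by
  induction K generalizing n with
  | zero => simp [f]
  | succ K ih =>
    show n / 2 ^^^ f K (n / 2 / 2) = (n ^^^ f K (n / 2)) / 2
    rw [Nat.xor_div_two, ih]

theorem f_shift (K n s : Nat) : f K (n >>> s) = f K n >>> s := by
  induction s generalizing n with
  | zero => simp
  | succ s ih =>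
    have h1 : n >>> (s + 1) = (n >>> s) / 2 := by
      rw [Nat.shiftRight_add, Nat.shiftRight_one]
    have h2 : f K n >>> (s + 1) = (f K n >>> s) / 2 := by
      rw [Nat.shiftRight_add, Nat.shiftRight_one]
    rw [h1, h2, f_shift_one, ih]

theorem f_add (K1 K2 n : Nat) : f (K1 + K2) n = f K1 n ^^^ f K2 (n >>> K1) := by
  induction K1 generalizing n with
  | zero => simp [f]
  | succ K1 ih =>
    have h1 : K1 + 1 + K2 = (K1 + K2) + 1 := by ring
    rw [h1]
    show n ^^^ f (K1 + K2) (n / 2) = (n ^^^ f K1 (n / 2)) ^^^ f K2 (n >>> (K1 + 1))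
    have hsh : n >>> (K1 + 1) = (n / 2) >>> K1 := by
      rw [Nat.add_comm, Nat.shiftRight_add, Nat.shiftRight_one]
    rw [ih, Nat.xor_assoc, hsh]

theorem f_double (K n : Nat) : f (2 * K) n = f K n ^^^ (f K n >>> K) := by
  have h : 2 * K = K + K := by ring
  rw [h, f_add, f_shift]

theorem f_big (K n : Nat) (hK : 1 ≤ K) (h : 2 ^ K ≤ n) : 2 ^ K ≤ f K n := by
  have hn0 : n ≠ 0 := by
    have := Nat.one_le_two_pow (n := K); omega
  set s := n.size with hs
  have hns : n < 2 ^ s := Nat.lt_size_self n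
  have hs0 : s ≠ 0 := by
    intro h0; exact hn0 (Nat.size_eq_zero.mp h0)
  have hlo : 2 ^ (s - 1) ≤ n := by
    by_contra hlt
    have : s ≤ s - 1 := Nat.size_le.mpr (by omega)
    omega
  have hKs : K < s := by
    have h2 : 2 ^ K < 2 ^ s := by omega
    exact (Nat.pow_lt_pow_iff_right (by norm_num)).mp h2
  obtain ⟨K', rfl⟩ : ∃ K', K = K' + 1 := ⟨K - 1, by omega⟩
  have hsp : 2 ^ s = 2 * 2 ^ (s - 1) := by
    have hse' : s - 1 + 1 = s := by omega
    rw [← hse', pow_succ, Nat.add_sub_cancel]; ring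
  have hhalf : n / 2 < 2 ^ (s - 1) := by omega
  have hb : f K' (n / 2) < 2 ^ (s - 1) := f_lt _ _ _ hhalf
  have hx : 2 ^ (s - 1) ≤ n ^^^ f K' (n / 2) := by
    by_contra hlt
    have hn2 : n = (n ^^^ f K' (n / 2)) ^^^ f K' (n / 2) := by
      rw [Nat.xor_assoc, Nat.xor_self, Nat.xor_zero]
    have : n < 2 ^ (s - 1) := by
      rw [hn2]; exact Nat.xor_lt_two_pow (by omega) hb
    omega
  have hKs1 : 2 ^ (K' + 1) ≤ 2 ^ (s - 1) := Nat.pow_le_pow_right (by norm_num) (by omega)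
  calc 2 ^ (K' + 1) ≤ 2 ^ (s - 1) := hKs1
    _ ≤ n ^^^ f K' (n / 2) := hx
    _ = f (K' + 1) n := rfl

theorem loopN_eq_g (F K n : Nat) (hK : 1 ≤ K) (h : n < 2 ^ (K * 2 ^ F)) :
    loopN F (f K n) K = g n := by
  induction F generalizing K with
  | zero =>
    simp only [loopN]
    exact f_eq_g K n (by simpa using h)
  | succ F ih =>
    by_cases hc : f K n >>> K = 0
    · simp only [loopN, if_pos hc]
      have h1 : f K n < 2 ^ K := (srz _ _).mp hc
      have h2 : n < 2 ^ K := by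
        by_contra hge
        have := f_big K n hK (by omega)
        omega
      exact f_eq_g K n h2
    · simp only [loopN, if_neg hc]
      have hstep : f K n ^^^ f K n >>> K = f (2 * K) n := (f_double K n).symm
      have hK2 : K <<< 1 = 2 * K := by
        rw [Nat.shiftLeft_eq]; ring
      rw [hstep, hK2]
      apply ih (2 * K) (by omega)
      have hexp : K * 2 ^ (F + 1) = 2 * K * 2 ^ F := by ring
      rw [hexp] at h
      exact h

-- cast bridges: the Int loops on nonneg input equal their Nat models
theorem blademulLoop_cast (F : Nat) (x i : Nat) :
    blademulLoop F (x : Int) i = ((loopN F x i : Nat) : Int) := by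
  induction F generalizing x i with
  | zero => rfl
  | succ F ih =>
    show (if (x : Int) >>> i = 0 then _ else _) = _
    rw [← Int.natCast_shiftRight]
    by_cases hc : x >>> i = 0
    · simp [loopN, hc]
    · have hc' : ((x >>> i : Nat) : Int) ≠ 0 := by exact_mod_cast hc
      rw [if_neg hc']
      simp only [loopN, if_neg hc]
      rw [PySem.Int.bxor_natCast, ih]

theorem blademulAltLoop_cast (F : Nat) (m total : Nat) (b2 : Int) (h : m < 2 ^ F) :
    blademulAltLoop F (m : Int) total b2 = total + T b2 m := by
  induction F generalizing m total with
  | zero =>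
    have : m = 0 := by simpa using h
    simp [this, blademulAltLoop, T_zero]
  | succ F ih =>
    by_cases hc : m = 0
    · simp [hc, blademulAltLoop, T_zero]
    · have hc' : ((m : Nat) : Int) ≠ 0 := by exact_mod_cast hc
      show (if (m : Int) = 0 then _ else _) = _
      rw [if_neg hc']
      have hsh : (m : Int) >>> (1 : Nat) = ((m / 2 : Nat) : Int) := by
        rw [← Int.natCast_shiftRight, Nat.shiftRight_one]
      rw [hsh, ih _ _ (by omega), T_pos b2 m hc]
      omega

theorem band_one_natCast (u : Nat) : PySem.Int.band (u : Int) 1 = ((u % 2 : Nat) : Int) := by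
  have h1 : (1 : Int) = ((1 : Nat) : Int) := rfl
  rw [h1, PySem.Int.band_natCast, Nat.and_one_is_mod]

-- ===== VERDICT (by name: the statement is the Claim_ definition above) =====
theorem blademul_spec : Claim_equal_blademul := by
  intro b1 b2 _ hpre
  unfold Spec_blademul blademul blademul_alt
  have hb1 : b1 = ((b1.toNat : Nat) : Int) := (Int.toNat_of_nonneg hpre).symm
  set n := b1.toNat with hn
  rw [hb1, Int.natAbs_natCast]
  -- A side
  have hf1 : f 1 n = n := by simp [f]
  have hbig : n < 2 ^ (1 * 2 ^ (n + 1)) := by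
    have h1 : n < 2 ^ n := Nat.lt_two_pow_self
    have h2 : n ≤ 2 ^ (n + 1) := by
      have := Nat.lt_two_pow_self (n := n + 1); omega
    have h3 : 2 ^ n ≤ 2 ^ (1 * 2 ^ (n + 1)) := Nat.pow_le_pow_right (by norm_num) (by omega)
    omega
  have hA : blademulLoop (n + 1) ((n : Nat) : Int) 1 = ((g n : Nat) : Int) := by
    rw [blademulLoop_cast]
    congr 1
    calc loopN (n + 1) n 1 = loopN (n + 1) (f 1 n) 1 := by rw [hf1]
      _ = g n := loopN_eq_g (n + 1) 1 n (by omega) hbig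
  rw [hA]
  -- B side
  have hB : blademulAltLoop (n + 1) ((n : Nat) : Int) 0 b2 = T b2 n := by
    rw [blademulAltLoop_cast]
    · omega
    · have := Nat.lt_two_pow_self (n := n); omega
  rw [hB]
  rw [band_one_natCast, band_one_natCast]
  exact_mod_cast congrArg (fun u => ((u : Nat) : Int)) (g_parity b2 n)
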